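-- pv_equiv track=rewrite | github.com/cianc/AoC2025 | day09.py | square_has_total_rg_overlap
-- ===== SOURCE A (Python) =====
-- from typing import List, Tuple, Dict, Set
--
-- def square_has_total_rg_overlap(corners: Tuple[Tuple[int, int], Tuple[int, int]], red_and_green_ranges: Dict[int, Tuple[int, int]]) -> bool:
--     square_left_edge, square_right_edge = sorted([corners[0][0], corners[1][0]])
--     square_top_edge, square_bottom_edge = sorted([corners[0][1], corners[1][1]])
--
--     y_range = range(square_top_edge, square_bottom_edge + 1)
--
--     # If the square has no height, it trivially satisfies the condition.
--     if not y_range: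
--         return True
--
--     try:
--         # Instead of looping and checking each row, we can find the most restrictive
--         # horizontal range across all rows the square occupies. This is done by finding
--         # the maximum of all left boundaries and the minimum of all right boundaries.
--         max_left_boundary = max(red_and_green_ranges[y][0] for y in y_range)
--         min_right_boundary = min(red_and_green_ranges[y][1] for y in y_range)
--     except KeyError:
--         # If any y-coordinate of the square is not in the ranges dictionary,
--         # it means there's no overlap, so we fail fast.
--         return False
--
--     # The entire square must fit within this single, most restrictive horizontal range.
--     return square_left_edge >= max_left_boundary and square_right_edge <= min_right_boundary
-- ===== SOURCE B (Python) =====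
-- def square_has_total_rg_overlap(corners, red_and_green_ranges):
--     left, right = sorted([corners[0][0], corners[1][0]])
--     top, bottom = sorted([corners[0][1], corners[1][1]])
--     for y in range(top, bottom + 1):
--         row = red_and_green_ranges.get(y)
--         if row is None:
--             return False
--         if left < row[0] or right > row[1]:
--             return False
--     return True
-- ===== Notes on version B (the rewrite author's own statement) =====
-- stated objective: simpler
-- what changed: B checks containment row by row with an early-exit loop (missing row or row not covering the square returns False immediately) instead of A's two aggregate passes computing max of left boundaries and min of right boundaries under a try/except KeyError.
import Mathlib
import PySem

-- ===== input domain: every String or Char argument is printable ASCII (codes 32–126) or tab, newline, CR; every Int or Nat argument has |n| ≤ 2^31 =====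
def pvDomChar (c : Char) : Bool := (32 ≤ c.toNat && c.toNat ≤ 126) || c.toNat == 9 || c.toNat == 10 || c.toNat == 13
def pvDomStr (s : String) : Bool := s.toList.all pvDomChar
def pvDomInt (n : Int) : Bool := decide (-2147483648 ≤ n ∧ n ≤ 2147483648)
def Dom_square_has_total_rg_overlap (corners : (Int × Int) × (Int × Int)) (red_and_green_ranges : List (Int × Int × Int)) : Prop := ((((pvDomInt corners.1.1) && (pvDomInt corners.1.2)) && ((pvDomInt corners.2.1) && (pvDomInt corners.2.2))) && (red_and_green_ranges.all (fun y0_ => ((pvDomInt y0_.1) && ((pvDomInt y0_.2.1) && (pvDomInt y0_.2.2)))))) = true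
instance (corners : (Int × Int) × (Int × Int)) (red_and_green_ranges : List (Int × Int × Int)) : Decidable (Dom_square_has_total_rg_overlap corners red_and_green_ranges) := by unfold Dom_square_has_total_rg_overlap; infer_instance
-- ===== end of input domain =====

-- B replaces A's two aggregate passes (max of left boundaries / min of right boundaries under
-- try/except KeyError) by a single early-exit loop checking containment row by row (objective: simpler).

-- ===== PORT A =====
-- max(red_and_green_ranges[y][0] for y in range(y0, y0+n)): none = KeyError anywhere in the
-- generator (the range is iterated lazily, as Python does: stop at the first missing key)
def pvAMaxLeft (d : PySem.Dict Int (Int × Int)) : Int → Nat → Option Int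
  | _, 0 => none
  | y, 1 => (d.get? y).map (fun v => v.1)
  | y, n + 2 => match d.get? y with
      | none => none
      | some v => match pvAMaxLeft d (y + 1) (n + 1) with
          | none => none
          | some m => some (max v.1 m)

-- min(red_and_green_ranges[y][1] for y in range(y0, y0+n))
def pvAMinRight (d : PySem.Dict Int (Int × Int)) : Int → Nat → Option Int
  | _, 0 => none
  | y, 1 => (d.get? y).map (fun v => v.2)
  | y, n + 2 => match d.get? y with
      | none => none
      | some v => match pvAMinRight d (y + 1) (n + 1) with
          | none => none
          | some m => some (min v.2 m)

def square_has_total_rg_overlap (corners : (Int × Int) × (Int × Int)) (red_and_green_ranges : List (Int × Int × Int)) : Bool :=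
  let d := PySem.Dict.ofList red_and_green_ranges
  let square_left_edge := min corners.1.1 corners.2.1      -- sorted([c0x, c1x])
  let square_right_edge := max corners.1.1 corners.2.1
  let square_top_edge := min corners.1.2 corners.2.2
  let square_bottom_edge := max corners.1.2 corners.2.2
  let n := (square_bottom_edge + 1 - square_top_edge).toNat   -- length of range(top, bottom+1)
  if n = 0 then true                                          -- if not y_range: return True
  else
    match pvAMaxLeft d square_top_edge n with
    | none => false                                           -- except KeyError: return False
    | some max_left_boundary =>
        match pvAMinRight d square_top_edge n with
        | none => false
        | some min_right_boundary =>
            decide (square_left_edge ≥ max_left_boundary ∧ square_right_edge ≤ min_right_boundary)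

-- ===== PORT B =====
-- for y in range(y0, y0+n): early-exit containment check, lazy over the range
def pvBLoop (d : PySem.Dict Int (Int × Int)) (left right : Int) : Int → Nat → Bool
  | _, 0 => true
  | y, n + 1 => match d.get? y with
      | none => false
      | some row => if left < row.1 || right > row.2 then false else pvBLoop d left right (y + 1) n

def square_has_total_rg_overlap_alt (corners : (Int × Int) × (Int × Int)) (red_and_green_ranges : List (Int × Int × Int)) : Bool :=
  let d := PySem.Dict.ofList red_and_green_ranges
  let left := min corners.1.1 corners.2.1
  let right := max corners.1.1 corners.2.1
  let top := min corners.1.2 corners.2.2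
  let bottom := max corners.1.2 corners.2.2
  pvBLoop d left right top (bottom + 1 - top).toNat

-- ===== PRECONDITION & SPEC =====
def Spec_square_has_total_rg_overlap (corners : (Int × Int) × (Int × Int)) (red_and_green_ranges : List (Int × Int × Int)) (out : Bool) : Prop := out = square_has_total_rg_overlap_alt corners red_and_green_ranges
instance (corners : (Int × Int) × (Int × Int)) (red_and_green_ranges : List (Int × Int × Int)) (out : Bool) : Decidable (Spec_square_has_total_rg_overlap corners red_and_green_ranges out) := by unfold Spec_square_has_total_rg_overlap; infer_instance

-- ===== CLAIM (what is proved, stated in full; the proofs are below) =====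
def Claim_equal_square_has_total_rg_overlap : Prop := ∀ (corners : (Int × Int) × (Int × Int)) (red_and_green_ranges : List (Int × Int × Int)), Dom_square_has_total_rg_overlap corners red_and_green_ranges → Spec_square_has_total_rg_overlap corners red_and_green_ranges (square_has_total_rg_overlap corners red_and_green_ranges)

-- ===== LEMMAS AND PROOFS =====
lemma pv_key (d : PySem.Dict Int (Int × Int)) (l r : Int) :
    ∀ (n : Nat) (y : Int), n ≠ 0 →
      (match pvAMaxLeft d y n with
        | none => false
        | some M => match pvAMinRight d y n with
            | none => false
            | some m => decide (l ≥ M ∧ r ≤ m)) = pvBLoop d l r y n := by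
  intro n
  induction n with
  | zero => intro y h; exact absurd rfl h
  | succ n ih =>
    intro y _
    cases n with
    | zero =>
      simp only [pvAMaxLeft, pvAMinRight, pvBLoop]
      cases h : d.get? y with
      | none => simp
      | some v =>
        simp only [Option.map_some]
        by_cases h1 : l < v.1 <;> by_cases h2 : r > v.2 <;> simp_all
    | succ m =>
      have ihne := ih (y + 1) (by simp)
      rw [pvBLoop, ← ihne]
      simp only [pvAMaxLeft, pvAMinRight]
      cases h : d.get? y with
      | none => rfl
      | some v =>
        cases hM : pvAMaxLeft d (y + 1) (m + 1) <;> cases hm : pvAMinRight d (y + 1) (m + 1) <;>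
          by_cases h1 : l < v.1 <;> by_cases h2 : r > v.2 <;> simp_all

-- ===== VERDICT (by name: the statement is the Claim_ definition above) =====
theorem square_has_total_rg_overlap_spec : Claim_equal_square_has_total_rg_overlap := by
  intro corners rg _
  unfold Spec_square_has_total_rg_overlap square_has_total_rg_overlap square_has_total_rg_overlap_alt
  simp only []
  by_cases hn : (max corners.1.2 corners.2.2 + 1 - min corners.1.2 corners.2.2).toNat = 0
  · simp [hn, pvBLoop]
  · simp only [hn, if_false]
    exact pv_key (PySem.Dict.ofList rg) (min corners.1.1 corners.2.1) (max corners.1.1 corners.2.1) _ (min corners.1.2 corners.2.2) hn
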